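-- pv_equiv track=rewrite | github.com/suyundukov/LIFAP1 | TD/TD4/Code/Python/6AB.py | somme_produit
-- ===== SOURCE A (Python) =====
-- def somme_produit(foo):
--     somme = 0
--     prod = 1
--     for i in range(1, foo + 1):
--         if foo % i == 0:
--             somme += i
--             prod *= i
--     return somme, prod
-- ===== SOURCE B (Python) =====
-- def somme_produit(foo):
--     somme = 0
--     prod = 1
--     i = 1
--     while i * i <= foo:
--         if foo % i == 0:
--             j = foo // i
--             if i == j:
--                 somme += i
--                 prod *= i
--             else:
--                 somme += i + j
--                 prod *= i * j
--         i += 1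
--     return somme, prod
-- ===== Notes on version B (the rewrite author's own statement) =====
-- stated objective: faster
-- what changed: Replaces the O(n) scan of all candidates 1..n by a while loop up to sqrt(n) that adds/multiplies each divisor pair (i, n//i) at once, handling the perfect-square divisor once.
import Mathlib
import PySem

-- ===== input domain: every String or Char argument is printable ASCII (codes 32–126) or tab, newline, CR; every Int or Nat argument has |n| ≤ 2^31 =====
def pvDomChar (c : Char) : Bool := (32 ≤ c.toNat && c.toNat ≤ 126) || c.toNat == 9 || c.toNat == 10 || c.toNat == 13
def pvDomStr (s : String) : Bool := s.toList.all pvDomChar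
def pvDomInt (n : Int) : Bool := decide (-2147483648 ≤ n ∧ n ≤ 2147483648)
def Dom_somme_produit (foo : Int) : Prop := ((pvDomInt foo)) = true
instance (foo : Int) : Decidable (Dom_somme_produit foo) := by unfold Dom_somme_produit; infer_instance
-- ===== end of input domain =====

-- B replaces A's O(foo) scan of 1..foo by an O(sqrt foo) loop over divisor pairs (i, foo // i).

-- ===== PORT A =====
def somme_produit (foo : Int) : List Int :=
  let r := (PySem.List.pyRange 1 (foo + 1)).foldl
    (fun (sp : Int × Int) i => if PySem.Int.mod foo i == 0 then (sp.1 + i, sp.2 * i) else sp)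
    (0, 1)
  [r.1, r.2]

-- ===== PORT B =====
-- the 'while i * i <= foo' loop of Source B, carrying (somme, prod)
def spLoop (foo : Int) (i : Int) (somme : Int) (prod : Int) : Int × Int :=
  if h : i * i ≤ foo then
    if PySem.Int.mod foo i == 0 then
      let j := PySem.Int.floordiv foo i
      if i == j then spLoop foo (i + 1) (somme + i) (prod * i)
      else spLoop foo (i + 1) (somme + (i + j)) (prod * (i * j))
    else spLoop foo (i + 1) somme prod
  else (somme, prod)
termination_by (foo + 1 - i).toNat
decreasing_by
  all_goals
    have hi : i ≤ foo := by nlinarith [mul_self_nonneg (i - 1), mul_self_nonneg i]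
    omega

def somme_produit_alt (foo : Int) : List Int :=
  let r := spLoop foo 1 0 1
  [r.1, r.2]

-- ===== PRECONDITION & SPEC =====
def Spec_somme_produit (foo : Int) (out : List Int) : Prop := out = somme_produit_alt foo
instance (foo : Int) (out : List Int) : Decidable (Spec_somme_produit foo out) := by unfold Spec_somme_produit; infer_instance

-- ===== CLAIM (what is proved, stated in full; the proofs are below) =====
def Claim_equal_somme_produit : Prop := ∀ (foo : Int), Dom_somme_produit foo → Spec_somme_produit foo (somme_produit foo)

-- ===== LEMMAS AND PROOFS =====

-- per-index contributions of each loop, as ℤ-valued functions on ℕ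
def cA (n k : ℕ) : ℤ := if k ∣ n then (k : ℤ) else 0
def mA (n k : ℕ) : ℤ := if k ∣ n then (k : ℤ) else 1
def cB (n k : ℕ) : ℤ := if k ∣ n then (if k * k = n then (k : ℤ) else (k : ℤ) + ((n / k : ℕ) : ℤ)) else 0
def mB (n k : ℕ) : ℤ := if k ∣ n then (if k * k = n then (k : ℤ) else (k : ℤ) * ((n / k : ℕ) : ℤ)) else 1

-- A's loop over range(a, n+1) accumulates cA / mA over Ico a.toNat (n+1)
lemma A_loop (n : ℕ) (a : ℤ) (ha : 1 ≤ a) (s p : ℤ) :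
    (PySem.List.pyRange a ((n : ℤ) + 1)).foldl
      (fun (sp : Int × Int) i => if PySem.Int.mod (n : ℤ) i == 0 then (sp.1 + i, sp.2 * i) else sp)
      (s, p)
    = (s + ∑ k ∈ Finset.Ico a.toNat (n + 1), cA n k,
       p * ∏ k ∈ Finset.Ico a.toNat (n + 1), mA n k) := by
  generalize hM : n + 1 - a.toNat = M
  induction M generalizing a s p with
  | zero =>
    have hge : ¬ a < (n : ℤ) + 1 := by omega
    have hr : PySem.List.pyRange a ((n : ℤ) + 1) = [] := by
      simp [PySem.List.pyRange, hge]
    have hic : Finset.Ico a.toNat (n + 1) = ∅ := Finset.Ico_eq_empty (by omega)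
    rw [hr, hic]; simp
  | succ M ih =>
    have hlt : a < (n : ℤ) + 1 := by omega
    rw [PySem.List.pyRange_one_cons hlt]
    simp only [List.foldl_cons]
    have hk : ((a.toNat : ℕ) : ℤ) = a := by omega
    have hklt : a.toNat < n + 1 := by omega
    have hmod : PySem.Int.mod (n : ℤ) a = ((n % a.toNat : ℕ) : ℤ) := by
      rw [← hk]; exact PySem.Int.mod_natCast n a.toNat
    have hsucc : (a + 1).toNat = a.toNat + 1 := by omega
    by_cases hdvd : a.toNat ∣ n
    · have hc : (PySem.Int.mod (n : ℤ) a == 0) = true := by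
        rw [hmod]
        simp only [beq_iff_eq, Nat.cast_eq_zero]
        exact Nat.dvd_iff_mod_eq_zero.mp hdvd
      rw [hc, if_pos rfl, ih (a + 1) (by omega) _ _ (by omega)]
      rw [Finset.sum_eq_sum_Ico_succ_bot hklt (cA n), Finset.prod_eq_prod_Ico_succ_bot hklt (mA n)]
      rw [hsucc]
      simp only [cA, mA, if_pos hdvd, hk]
      exact Prod.ext (by ring) (by ring)
    · have hc : (PySem.Int.mod (n : ℤ) a == 0) = false := by
        rw [hmod]
        simp only [beq_eq_false_iff_ne, ne_eq, Nat.cast_eq_zero]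
        intro h0
        exact hdvd (Nat.dvd_iff_mod_eq_zero.mpr h0)
      rw [hc]
      simp only [Bool.false_eq_true, if_false]
      rw [ih (a + 1) (by omega) _ _ (by omega)]
      rw [Finset.sum_eq_sum_Ico_succ_bot hklt (cA n), Finset.prod_eq_prod_Ico_succ_bot hklt (mA n)]
      rw [hsucc]
      simp only [cA, mA, if_neg hdvd]
      exact Prod.ext (by ring) (by ring)

-- B's loop from i = a accumulates cB / mB over Ico a.toNat (sqrt n + 1)
lemma B_loop (n : ℕ) (a : ℤ) (ha : 1 ≤ a) (s p : ℤ) :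
    spLoop (n : ℤ) a s p
    = (s + ∑ k ∈ Finset.Ico a.toNat (Nat.sqrt n + 1), cB n k,
       p * ∏ k ∈ Finset.Ico a.toNat (Nat.sqrt n + 1), mB n k) := by
  generalize hM : Nat.sqrt n + 1 - a.toNat = M
  induction M generalizing a s p with
  | zero =>
    have hk : ((a.toNat : ℕ) : ℤ) = a := by omega
    have hbig : n < a.toNat * a.toNat := Nat.sqrt_lt.mp (by omega)
    have hguard : ¬ a * a ≤ (n : ℤ) := by
      rw [← hk]; exact_mod_cast not_le.mpr (by exact_mod_cast hbig)
    rw [spLoop, dif_neg hguard, Finset.Ico_eq_empty (by omega)]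
    simp
  | succ M ih =>
    have hk : ((a.toNat : ℕ) : ℤ) = a := by omega
    have hle : a.toNat ≤ Nat.sqrt n := by omega
    have hsmall : a.toNat * a.toNat ≤ n := Nat.le_sqrt.mp hle
    have hguard : a * a ≤ (n : ℤ) := by
      rw [← hk]; exact_mod_cast hsmall
    have hklt : a.toNat < Nat.sqrt n + 1 := by omega
    have hmod : PySem.Int.mod (n : ℤ) a = ((n % a.toNat : ℕ) : ℤ) := by
      rw [← hk]; exact PySem.Int.mod_natCast n a.toNat
    have hdiv : PySem.Int.floordiv (n : ℤ) a = ((n / a.toNat : ℕ) : ℤ) := by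
      rw [← hk]; exact PySem.Int.floordiv_natCast n a.toNat
    have hsucc : (a + 1).toNat = a.toNat + 1 := by omega
    rw [spLoop, dif_pos hguard]
    by_cases hdvd : a.toNat ∣ n
    · have hc : (PySem.Int.mod (n : ℤ) a == 0) = true := by
        rw [hmod]
        simp only [beq_iff_eq, Nat.cast_eq_zero]
        exact Nat.dvd_iff_mod_eq_zero.mp hdvd
      rw [hc, if_pos rfl]
      simp only [hdiv]
      have hkkn : a.toNat * (n / a.toNat) = n := Nat.mul_div_cancel' hdvd
      by_cases hsq : a.toNat * a.toNat = n
      · have hquot : n / a.toNat = a.toNat := by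
          rw [← hsq]; exact Nat.mul_div_cancel_left a.toNat (by omega)
        have heq : (a == ((n / a.toNat : ℕ) : ℤ)) = true := by
          simp only [beq_iff_eq]; rw [hquot, hk]
        rw [heq, if_pos rfl, ih (a + 1) (by omega) _ _ (by omega)]
        rw [Finset.sum_eq_sum_Ico_succ_bot hklt (cB n), Finset.prod_eq_prod_Ico_succ_bot hklt (mB n)]
        rw [hsucc]
        simp only [cB, mB, if_pos hdvd, if_pos hsq, hk]
        exact Prod.ext (by ring) (by ring)
      · have hneq : (a == ((n / a.toNat : ℕ) : ℤ)) = false := by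
          rw [beq_eq_false_iff_ne, ← hk]
          intro h
          have hh : a.toNat = n / a.toNat := by exact_mod_cast h
          apply hsq
          rw [← hh] at hkkn
          exact hkkn
        rw [hneq]
        simp only [Bool.false_eq_true, if_false]
        rw [ih (a + 1) (by omega) _ _ (by omega)]
        rw [Finset.sum_eq_sum_Ico_succ_bot hklt (cB n), Finset.prod_eq_prod_Ico_succ_bot hklt (mB n)]
        rw [hsucc]
        simp only [cB, mB, if_pos hdvd, if_neg hsq, hk]
        exact Prod.ext (by ring) (by ring)
    · have hc : (PySem.Int.mod (n : ℤ) a == 0) = false := by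
        rw [hmod]
        simp only [beq_eq_false_iff_ne, ne_eq, Nat.cast_eq_zero]
        intro h0
        exact hdvd (Nat.dvd_iff_mod_eq_zero.mpr h0)
      rw [hc]
      simp only [Bool.false_eq_true, if_false]
      rw [ih (a + 1) (by omega) _ _ (by omega)]
      rw [Finset.sum_eq_sum_Ico_succ_bot hklt (cB n), Finset.prod_eq_prod_Ico_succ_bot hklt (mB n)]
      rw [hsucc]
      simp only [cB, mB, if_neg hdvd]
      exact Prod.ext (by ring) (by ring)

-- divisor-pairing: the product over all divisors equals the product over small divisors of the paired terms
lemma pairing (n : ℕ) (hn : 0 < n) {M : Type} [CommMonoid M] (f : ℕ → M) :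
    ∏ d ∈ (Finset.Ico 1 (n + 1)).filter (· ∣ n), f d
    = ∏ k ∈ (Finset.Ico 1 (Nat.sqrt n + 1)).filter (· ∣ n),
        (if k * k = n then f k else f k * f (n / k)) := by
  have hpos : ∀ d : ℕ, d ∣ n → 0 < d := fun d hd => Nat.pos_of_dvd_of_pos hd hn
  -- the small-divisor index set is the divisors with d*d ≤ n
  have hS : (Finset.Ico 1 (Nat.sqrt n + 1)).filter (· ∣ n)
      = ((Finset.Ico 1 (n + 1)).filter (· ∣ n)).filter (fun d => d * d ≤ n) := by
    ext k
    simp only [Finset.mem_filter, Finset.mem_Ico]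
    constructor
    · rintro ⟨⟨h1, h2⟩, hd⟩
      exact ⟨⟨⟨h1, by have := Nat.le_of_dvd hn hd; omega⟩, hd⟩, Nat.le_sqrt.mp (by omega)⟩
    · rintro ⟨⟨⟨h1, _⟩, hd⟩, hsq⟩
      exact ⟨⟨h1, by have := Nat.le_sqrt.mpr hsq; omega⟩, hd⟩
  rw [hS, Finset.prod_ite, Finset.prod_mul_distrib,
      ← Finset.prod_filter_mul_prod_filter_not ((Finset.Ico 1 (n + 1)).filter (· ∣ n))
        (fun d => d * d ≤ n) f,
      ← Finset.prod_filter_mul_prod_filter_not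
        (((Finset.Ico 1 (n + 1)).filter (· ∣ n)).filter (fun d => d * d ≤ n))
        (fun k => k * k = n) f]
  -- the large divisors are in bijection (d ↦ n / d) with the strictly small ones
  have hbij : ∏ d ∈ ((Finset.Ico 1 (n + 1)).filter (· ∣ n)).filter (fun d => ¬ d * d ≤ n), f d
      = ∏ k ∈ (((Finset.Ico 1 (n + 1)).filter (· ∣ n)).filter (fun d => d * d ≤ n)).filter
          (fun k => ¬ k * k = n), f (n / k) := by
    have hmemL : ∀ d, d ∈ ((Finset.Ico 1 (n + 1)).filter (· ∣ n)).filter (fun d => ¬ d * d ≤ n)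
        ↔ d ∣ n ∧ n < d * d := by
      intro d
      simp only [Finset.mem_filter, Finset.mem_Ico, not_le]
      constructor
      · rintro ⟨⟨_, hd⟩, hh⟩; exact ⟨hd, hh⟩
      · rintro ⟨hd, hh⟩
        exact ⟨⟨⟨hpos d hd, by have := Nat.le_of_dvd hn hd; omega⟩, hd⟩, hh⟩
    have hmemS2 : ∀ k, k ∈ (((Finset.Ico 1 (n + 1)).filter (· ∣ n)).filter
        (fun d => d * d ≤ n)).filter (fun k => ¬ k * k = n) ↔ k ∣ n ∧ k * k < n := by
      intro k
      simp only [Finset.mem_filter, Finset.mem_Ico]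
      constructor
      · rintro ⟨⟨⟨_, hd⟩, hle⟩, hne⟩; exact ⟨hd, by omega⟩
      · rintro ⟨hd, hh⟩
        exact ⟨⟨⟨⟨hpos k hd, by have := Nat.le_of_dvd hn hd; omega⟩, hd⟩, by omega⟩, by omega⟩
    refine (Finset.prod_nbij' (fun k => n / k) (fun d => n / d) ?_ ?_ ?_ ?_ ?_).symm
    · intro k hk
      obtain ⟨hd, hlt⟩ := (hmemS2 k).mp hk
      obtain ⟨c, rfl⟩ := hd
      have hk0 : 0 < k := hpos k ⟨c, rfl⟩
      have hc : k * c / k = c := Nat.mul_div_cancel_left c hk0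
      rw [hmemL]
      simp only [hc]
      have hkc : k < c := Nat.lt_of_mul_lt_mul_left hlt
      exact ⟨⟨k, mul_comm k c⟩, by nlinarith⟩
    · intro d hd
      obtain ⟨hdd, hlt⟩ := (hmemL d).mp hd
      obtain ⟨c, rfl⟩ := hdd
      have hd0 : 0 < d := hpos d ⟨c, rfl⟩
      have hc : d * c / d = c := Nat.mul_div_cancel_left c hd0
      have hc0 : 0 < c := hpos c ⟨d, mul_comm d c⟩
      have hcd : c < d := by nlinarith
      rw [hmemS2]
      simp only [hc]
      exact ⟨⟨d, mul_comm d c⟩, by nlinarith⟩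
    · intro k hk
      obtain ⟨hd, _⟩ := (hmemS2 k).mp hk
      exact Nat.div_div_self hd (by omega)
    · intro d hd
      obtain ⟨hdd, _⟩ := (hmemL d).mp hd
      exact Nat.div_div_self hdd (by omega)
    · intro k _; rfl
  rw [hbij]
  exact mul_assoc _ _ _

lemma pairing_add (n : ℕ) (hn : 0 < n) (g : ℕ → ℤ) :
    ∑ d ∈ (Finset.Ico 1 (n + 1)).filter (· ∣ n), g d
    = ∑ k ∈ (Finset.Ico 1 (Nat.sqrt n + 1)).filter (· ∣ n),
        (if k * k = n then g k else g k + g (n / k)) := by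
  apply (Multiplicative.ofAdd).injective
  rw [ofAdd_sum, ofAdd_sum]
  have h2 : ∀ k, Multiplicative.ofAdd (if k * k = n then g k else g k + g (n / k))
      = (if k * k = n then Multiplicative.ofAdd (g k)
         else Multiplicative.ofAdd (g k) * Multiplicative.ofAdd (g (n / k))) := by
    intro k; split_ifs <;> simp
  simp_rw [h2]
  exact pairing n hn (fun d => Multiplicative.ofAdd (g d))

-- ===== VERDICT (by name: the statement is the Claim_ definition above) =====
theorem somme_produit_spec : Claim_equal_somme_produit := by
  intro foo _
  unfold Spec_somme_produit somme_produit somme_produit_alt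
  by_cases hpos : 0 < foo
  · obtain ⟨n, rfl⟩ : ∃ n : ℕ, foo = (n : ℤ) := ⟨foo.toNat, (Int.toNat_of_nonneg hpos.le).symm⟩
    have hn : 0 < n := by exact_mod_cast hpos
    rw [A_loop n 1 le_rfl 0 1, B_loop n 1 le_rfl 0 1]
    have hsum : ∑ k ∈ Finset.Ico (1 : ℤ).toNat (n + 1), cA n k
        = ∑ k ∈ Finset.Ico (1 : ℤ).toNat (Nat.sqrt n + 1), cB n k := by
      simp only [Int.toNat_one, cA, cB]
      rw [← Finset.sum_filter, ← Finset.sum_filter]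
      exact pairing_add n hn (fun d => (d : ℤ))
    have hprod : ∏ k ∈ Finset.Ico (1 : ℤ).toNat (n + 1), mA n k
        = ∏ k ∈ Finset.Ico (1 : ℤ).toNat (Nat.sqrt n + 1), mB n k := by
      simp only [Int.toNat_one, mA, mB]
      rw [← Finset.prod_filter, ← Finset.prod_filter]
      exact pairing n hn (fun d => (d : ℤ))
    rw [hsum, hprod]
  · have hA : PySem.List.pyRange 1 (foo + 1) = [] := by
      simp [PySem.List.pyRange]
      omega
    have hB : spLoop foo 1 0 1 = (0, 1) := by
      rw [spLoop, dif_neg (by omega)]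
    rw [hA, hB]
    simp
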